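-- pv_equiv track=rewrite | github.com/kraghunadhareddy/pdf-parser | response_extractor.py | _flex_contains_upper
-- ===== SOURCE A (Python) =====
-- def _flex_equal_upper(expected_s: str, i_mask: set[int], candidate_s: str) -> bool:
--     if len(expected_s) != len(candidate_s):
--         return False
--     for i, (e, c) in enumerate(zip(expected_s, candidate_s)):
--         if i in i_mask and e == 'I':
--             # Parity with label logic: accept I/L/l/1 when expected has uppercase 'I'
--             if c not in ('I', 'L', 'l', '1'):
--                 return False
--         else:
--             if e != c.upper():
--                 return False
--     return True
--
-- def _flex_contains_upper(expected_s: str, i_mask: set[int], haystack_s: str) -> bool: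
--     m, n = len(expected_s), len(haystack_s)
--     if m == 0:
--         return True
--     for i in range(0, n - m + 1):
--         if _flex_equal_upper(expected_s, i_mask, haystack_s[i:i + m]):
--             return True
--     return False
-- ===== SOURCE B (Python) =====
-- def _flex_contains_upper(expected_s: str, i_mask: set, haystack_s: str) -> bool:
--     # One left-to-right pass maintaining the set of pattern-prefix lengths that
--     # currently match (NFA simulation); no slicing, no restart per position.
--     m = len(expected_s)
--     if m == 0:
--         return True
--
--     def ok(j, c):
--         if j in i_mask and expected_s[j] == 'I':
--             return c in ('I', 'L', 'l', '1')
--         return expected_s[j] == c.upper()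
--
--     alive = []  # matched-prefix lengths in 1..m-1 ending at the previous char
--     for c in haystack_s:
--         nxt = []
--         for j in alive:
--             if ok(j, c):
--                 if j + 1 == m:
--                     return True
--                 nxt.append(j + 1)
--         if ok(0, c):
--             if m == 1:
--                 return True
--             nxt.append(1)
--         alive = nxt
--     return False
-- ===== Notes on version B (the rewrite author's own statement) =====
-- stated objective: alternative
-- what changed: A re-checks the pattern against a fresh slice of the haystack at every start position; B makes a single left-to-right pass over the haystack maintaining the list of currently-matching pattern-prefix lengths (NFA simulation), with no slicing and no restarts.
import Mathlib
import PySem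

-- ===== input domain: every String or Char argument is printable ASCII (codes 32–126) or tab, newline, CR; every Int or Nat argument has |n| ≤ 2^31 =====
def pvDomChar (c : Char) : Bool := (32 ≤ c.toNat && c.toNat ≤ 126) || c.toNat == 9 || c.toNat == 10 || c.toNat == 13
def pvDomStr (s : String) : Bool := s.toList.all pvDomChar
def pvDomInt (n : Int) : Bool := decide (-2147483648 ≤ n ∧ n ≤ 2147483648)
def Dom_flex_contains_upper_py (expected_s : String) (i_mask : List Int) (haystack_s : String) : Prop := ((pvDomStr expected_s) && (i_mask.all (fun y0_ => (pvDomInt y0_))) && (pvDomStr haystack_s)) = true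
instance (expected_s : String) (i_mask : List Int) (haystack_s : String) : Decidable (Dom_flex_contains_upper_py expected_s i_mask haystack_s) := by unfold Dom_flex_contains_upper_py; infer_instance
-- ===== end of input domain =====

-- B replaces A's slice-and-compare scan restarted at every start position by a single
-- left-to-right pass that maintains the list of currently-matching pattern-prefix lengths
-- (NFA simulation); objective: alternative one-pass algorithm (no per-position slicing).


-- ===== PORT A =====
-- loop body of _flex_equal_upper: enumerate(zip(expected_s, candidate_s)) with Python int index i
def flexEqGoA (i_mask : List Int) : List (Char × Char) → Int → Bool
  | [], _ => true
  | (e, c) :: rest, i =>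
    if i ∈ i_mask ∧ e = 'I' then
      if ¬ (c == 'I' || c == 'L' || c == 'l' || c == '1') then false
      else flexEqGoA i_mask rest (i + 1)
    else
      if e ≠ PySem.Chars.upperChar c then false   -- c.upper(): exact for the ASCII domain
      else flexEqGoA i_mask rest (i + 1)

def flexEqualUpperA (expected_s : String) (i_mask : List Int) (candidate_s : String) : Bool :=
  if expected_s.toList.length ≠ candidate_s.toList.length then false
  else flexEqGoA i_mask (List.zip expected_s.toList candidate_s.toList) 0

def flex_contains_upper_py (expected_s : String) (i_mask : List Int) (haystack_s : String) : Bool :=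
  let m : Int := expected_s.toList.length
  let n : Int := haystack_s.toList.length
  if m = 0 then true
  else (PySem.List.pyRange 0 (n - m + 1) 1).any fun i =>
    flexEqualUpperA expected_s i_mask (PySem.Str.slice haystack_s (some i) (some (i + m)))

-- ===== PORT B =====
-- Source B's ok(j, c): position j of the pattern accepts character c
def okB (expected : List Char) (i_mask : List Int) (j : Nat) (c : Char) : Bool :=
  if (j : Int) ∈ i_mask ∧ expected.getD j ' ' = 'I' then
    c == 'I' || c == 'L' || c == 'l' || c == '1'
  else expected.getD j ' ' == PySem.Chars.upperChar c   -- c.upper(): exact for the ASCII domain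

-- Source B's inner 'for j in alive' loop; none = the early 'return True' fired
def flexStepB (expected : List Char) (i_mask : List Int) (m : Nat) (c : Char) : List Nat → Option (List Nat)
  | [] => some []
  | j :: rest =>
    if okB expected i_mask j c then
      if j + 1 = m then none
      else (flexStepB expected i_mask m c rest).map (fun l => (j + 1) :: l)
    else flexStepB expected i_mask m c rest

-- Source B's outer 'for c in haystack_s' loop with state alive
def flexScanB (expected : List Char) (i_mask : List Int) (m : Nat) : List Char → List Nat → Bool
  | [], _ => false
  | c :: rest, alive =>
    match flexStepB expected i_mask m c alive with
    | none => true
    | some nxt =>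
      if okB expected i_mask 0 c then
        if m = 1 then true
        else flexScanB expected i_mask m rest (nxt ++ [1])
      else flexScanB expected i_mask m rest nxt

def flex_contains_upper_py_alt (expected_s : String) (i_mask : List Int) (haystack_s : String) : Bool :=
  let m := expected_s.toList.length
  if m = 0 then true
  else flexScanB expected_s.toList i_mask m haystack_s.toList []

-- ===== PRECONDITION & SPEC =====
def Spec_flex_contains_upper_py (expected_s : String) (i_mask : List Int) (haystack_s : String) (out : Bool) : Prop := out = flex_contains_upper_py_alt expected_s i_mask haystack_s
instance (expected_s : String) (i_mask : List Int) (haystack_s : String) (out : Bool) : Decidable (Spec_flex_contains_upper_py expected_s i_mask haystack_s out) := by unfold Spec_flex_contains_upper_py; infer_instance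

-- ===== CLAIM (what is proved, stated in full; the proofs are below) =====
def Claim_equal_flex_contains_upper_py : Prop := ∀ (expected_s : String) (i_mask : List Int) (haystack_s : String), Dom_flex_contains_upper_py expected_s i_mask haystack_s → Spec_flex_contains_upper_py expected_s i_mask haystack_s (flex_contains_upper_py expected_s i_mask haystack_s)

-- ===== LEMMAS AND PROOFS =====

-- semantic predicate: the first (e.length - j) chars of w match pattern positions j …
def Comp (e : List Char) (mask : List Int) (j : Nat) (w : List Char) : Prop :=
  e.length ≤ j + w.length ∧ ∀ k < e.length - j, okB e mask (j + k) (w.getD k ' ') = true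

lemma comp_cons (e : List Char) (mask : List Int) (j : Nat) (c : Char) (w : List Char)
    (hj : j < e.length) :
    Comp e mask j (c :: w) ↔
      okB e mask j c = true ∧ (j + 1 = e.length ∨ Comp e mask (j + 1) w) := by
  unfold Comp
  constructor
  · rintro ⟨hlen, hall⟩
    have h0 : okB e mask j c = true := by
      have := hall 0 (by omega); simpa using this
    refine ⟨h0, ?_⟩
    by_cases hje : j + 1 = e.length
    · exact Or.inl hje
    · refine Or.inr ⟨by simp at hlen ⊢; omega, fun k hk => ?_⟩
      have h' := hall (k + 1) (by omega)
      rw [show j + 1 + k = j + (k + 1) by omega]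
      simpa using h'
  · rintro ⟨h0, hrest⟩
    rcases hrest with hje | ⟨hlen, hall⟩
    · refine ⟨by simp; omega, fun k hk => ?_⟩
      have : k = 0 := by omega
      subst this; simpa using h0
    · refine ⟨by simp; omega, fun k hk => ?_⟩
      cases k with
      | zero => simpa using h0
      | succ k' =>
        have h' := hall k' (by omega)
        rw [show j + (k' + 1) = j + 1 + k' by omega]
        simpa using h'

lemma step_none_iff (e : List Char) (mask : List Int) (m : Nat) (c : Char) (alive : List Nat) :
    flexStepB e mask m c alive = none ↔ ∃ j ∈ alive, okB e mask j c = true ∧ j + 1 = m := by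
  induction alive with
  | nil => simp [flexStepB]
  | cons j rest ih =>
    simp only [flexStepB]
    by_cases hok : okB e mask j c = true
    · by_cases hjm : j + 1 = m
      · simp [hok, hjm]
      · simp [hok, hjm, Option.map_eq_none_iff, ih]
    · simp [hok, ih]

lemma step_some (e : List Char) (mask : List Int) (m : Nat) (c : Char) :
    ∀ (alive nxt : List Nat), flexStepB e mask m c alive = some nxt →
    nxt = (alive.filter (fun j => okB e mask j c)).map (· + 1) := by
  intro alive
  induction alive with
  | nil => intro nxt h; simp only [flexStepB, Option.some.injEq] at h; subst h; simp
  | cons j rest ih =>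
    intro nxt h
    simp only [flexStepB] at h
    by_cases hok : okB e mask j c = true
    · by_cases hjm : j + 1 = m
      · simp [hok, hjm] at h
      · rw [if_pos hok, if_neg hjm, Option.map_eq_some_iff] at h
        obtain ⟨l, hl, rfl⟩ := h
        simp [hok, ih l hl]
    · rw [if_neg hok] at h
      simp [hok, ih nxt h]

lemma scanB_iff (e : List Char) (mask : List Int) (hm : 0 < e.length) :
    ∀ (w : List Char) (alive : List Nat), (∀ j ∈ alive, j < e.length) →
      (flexScanB e mask e.length w alive = true ↔
        (∃ j ∈ alive, Comp e mask j w) ∨ ∃ i < w.length, Comp e mask 0 (w.drop i)) := by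
  intro w
  induction w with
  | nil =>
    intro alive hinv
    simp only [flexScanB]
    constructor
    · intro h; simp at h
    · rintro (⟨j, hj, hc⟩ | ⟨i, hi, _⟩)
      · have := hinv j hj; obtain ⟨hlc, _⟩ := hc; simp at hlc; omega
      · simp at hi
  | cons c rest ih =>
    intro alive hinv
    have hsplit : (∃ i < (c :: rest).length, Comp e mask 0 ((c :: rest).drop i)) ↔
        Comp e mask 0 (c :: rest) ∨ ∃ i < rest.length, Comp e mask 0 (rest.drop i) := by
      constructor
      · rintro ⟨i, hi, hc'⟩
        cases i with
        | zero => exact Or.inl (by simpa using hc')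
        | succ i' => exact Or.inr ⟨i', by simpa using hi, by simpa using hc'⟩
      · rintro (hc' | ⟨i, hi, hc'⟩)
        · exact ⟨0, by simp, by simpa using hc'⟩
        · exact ⟨i + 1, by simp; omega, by simpa using hc'⟩
    cases hstep : flexStepB e mask e.length c alive with
    | none =>
      simp only [flexScanB, hstep]
      rw [step_none_iff] at hstep
      obtain ⟨j, hj, hok, hjm⟩ := hstep
      refine iff_of_true (by trivial) (Or.inl ⟨j, hj, ?_⟩)
      rw [comp_cons e mask j c rest (hinv j hj)]
      exact ⟨hok, Or.inl hjm⟩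
    | some nxt =>
      simp only [flexScanB, hstep]
      have hnxt := step_some e mask e.length c alive nxt hstep
      have hnone : ¬ ∃ j ∈ alive, okB e mask j c = true ∧ j + 1 = e.length := by
        rw [← step_none_iff]; simp [hstep]
      have hmem : ∀ j', j' ∈ nxt ↔ ∃ j ∈ alive, okB e mask j c = true ∧ j' = j + 1 := by
        intro j'; subst hnxt
        simp only [List.mem_map, List.mem_filter]
        constructor
        · rintro ⟨j, ⟨hj, hok⟩, rfl⟩; exact ⟨j, hj, by simpa using hok, rfl⟩
        · rintro ⟨j, hj, hok, rfl⟩; exact ⟨j, ⟨hj, by simpa using hok⟩, rfl⟩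
      have hnxtlt : ∀ j' ∈ nxt, j' < e.length := by
        intro j' hj'
        rw [hmem] at hj'
        obtain ⟨j, hj, hok, rfl⟩ := hj'
        have h1 := hinv j hj
        have h2 : j + 1 ≠ e.length := fun hc => hnone ⟨j, hj, hok, hc⟩
        omega
      have halive : (∃ j ∈ alive, Comp e mask j (c :: rest)) ↔
          ∃ j' ∈ nxt, Comp e mask j' rest := by
        constructor
        · rintro ⟨j, hj, hc'⟩
          rw [comp_cons e mask j c rest (hinv j hj)] at hc'
          obtain ⟨hok, hje | hcomp⟩ := hc'
          · exact absurd ⟨j, hj, hok, hje⟩ hnone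
          · exact ⟨j + 1, (hmem _).2 ⟨j, hj, hok, rfl⟩, hcomp⟩
        · rintro ⟨j', hj', hc'⟩
          rw [hmem] at hj'
          obtain ⟨j, hj, hok, rfl⟩ := hj'
          refine ⟨j, hj, ?_⟩
          rw [comp_cons e mask j c rest (hinv j hj)]
          exact ⟨hok, Or.inr hc'⟩
      by_cases hok0 : okB e mask 0 c = true
      · by_cases h1 : e.length = 1
        · rw [if_pos hok0, if_pos h1]
          exact iff_of_true (by trivial) (Or.inr (hsplit.2 (Or.inl
            ((comp_cons e mask 0 c rest hm).2 ⟨hok0, Or.inl (by omega)⟩))))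
        · rw [if_pos hok0, if_neg h1]
          rw [ih (nxt ++ [1]) (by
            intro j' hj'
            rcases List.mem_append.1 hj' with h | h
            · exact hnxtlt j' h
            · simp at h; omega)]
          rw [hsplit, halive]
          have hc0 : Comp e mask 0 (c :: rest) ↔ Comp e mask 1 rest := by
            rw [comp_cons e mask 0 c rest hm]
            have h1' : ¬ (0 + 1 = e.length) := by omega
            simp [hok0, h1']
          rw [hc0]
          constructor
          · rintro (⟨j', hj', hc'⟩ | h)
            · rcases List.mem_append.1 hj' with hin | hin
              · exact Or.inl ⟨j', hin, hc'⟩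
              · simp at hin; subst hin; exact Or.inr (Or.inl hc')
            · exact Or.inr (Or.inr h)
          · rintro (⟨j', hj', hc'⟩ | hc' | h)
            · exact Or.inl ⟨j', List.mem_append.2 (Or.inl hj'), hc'⟩
            · exact Or.inl ⟨1, List.mem_append.2 (Or.inr (by simp)), hc'⟩
            · exact Or.inr h
      · rw [if_neg hok0]
        rw [ih nxt hnxtlt, hsplit, halive]
        have hc0 : ¬ Comp e mask 0 (c :: rest) := by
          rw [comp_cons e mask 0 c rest hm]
          simp [hok0]
        constructor
        · rintro (h | h)
          · exact Or.inl h
          · exact Or.inr (Or.inr h)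
        · rintro (h | h | h)
          · exact Or.inl h
          · exact absurd h hc0
          · exact Or.inr h

-- the index loop of _flex_equal_upper, generalized over the starting index
def okPair (mask : List Int) (i : Nat) (p : Char × Char) : Bool :=
  if (i : Int) ∈ mask ∧ p.1 = 'I' then
    p.2 == 'I' || p.2 == 'L' || p.2 == 'l' || p.2 == '1'
  else p.1 == PySem.Chars.upperChar p.2

lemma eqGoA_iff (mask : List Int) :
    ∀ (ps : List (Char × Char)) (s : Nat),
      (flexEqGoA mask ps (s : Int) = true ↔
        ∀ k < ps.length, okPair mask (s + k) (ps.getD k (' ', ' ')) = true) := by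
  intro ps
  induction ps with
  | nil => intro s; simp [flexEqGoA]
  | cons p ps ih =>
    intro s
    obtain ⟨ec, cc⟩ := p
    have hcast : (s : Int) + 1 = ((s + 1 : Nat) : Int) := by push_cast; ring
    have hsplit : (∀ k < ps.length + 1, okPair mask (s + k) (((ec, cc) :: ps).getD k (' ', ' ')) = true)
        ↔ okPair mask s (ec, cc) = true ∧
          ∀ k < ps.length, okPair mask (s + 1 + k) (ps.getD k (' ', ' ')) = true := by
      constructor
      · intro h
        refine ⟨by simpa using h 0 (by omega), fun k hk => ?_⟩
        have h' := h (k + 1) (by omega)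
        rw [show s + 1 + k = s + (k + 1) by omega]
        simpa using h'
      · rintro ⟨h0, h⟩ k hk
        cases k with
        | zero => simpa using h0
        | succ k' =>
          have h' := h k' (by omega)
          rw [show s + (k' + 1) = s + 1 + k' by omega]
          simpa using h'
    simp only [List.length_cons, hsplit]
    simp only [flexEqGoA]
    by_cases hc : (s : Int) ∈ mask ∧ ec = 'I'
    · rw [if_pos hc]
      have hok : okPair mask s (ec, cc) = (cc == 'I' || cc == 'L' || cc == 'l' || cc == '1') := by
        simp only [okPair, if_pos hc]
      by_cases hb : (cc == 'I' || cc == 'L' || cc == 'l' || cc == '1') = true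
      · have htrue : okPair mask s (ec, cc) = true := by rw [hok]; exact hb
        rw [if_neg (not_not_intro hb), hcast, ih (s + 1)]
        simp [htrue]
      · have hfalse : okPair mask s (ec, cc) = false := by
          rw [hok]; exact Bool.not_eq_true _ |>.mp hb
        rw [if_pos hb]
        simp [hfalse]
    · rw [if_neg hc]
      have hok : okPair mask s (ec, cc) = (ec == PySem.Chars.upperChar cc) := by
        simp only [okPair, if_neg hc]
      by_cases hb : ec = PySem.Chars.upperChar cc
      · have htrue : okPair mask s (ec, cc) = true := by rw [hok]; exact beq_iff_eq.2 hb
        rw [if_neg (not_not_intro hb), hcast, ih (s + 1)]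
        simp [htrue]
      · have hfalse : okPair mask s (ec, cc) = false := by
          rw [hok]; exact beq_eq_false_iff_ne.2 hb
        rw [if_pos hb]
        simp [hfalse]

lemma equalA_iff (es cs : String) (mask : List Int) :
    (flexEqualUpperA es mask cs = true ↔
      es.toList.length = cs.toList.length ∧
        ∀ k < es.toList.length, okB es.toList mask k (cs.toList.getD k ' ') = true) := by
  unfold flexEqualUpperA
  by_cases hlen : es.toList.length = cs.toList.length
  · rw [if_neg (by omega)]
    have h0 : ((0 : Nat) : Int) = (0 : Int) := rfl
    rw [← h0, eqGoA_iff]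
    simp only [List.length_zip, hlen, Nat.min_self, true_and]
    constructor
    · intro h k hk
      have hk' : k < cs.toList.length := by omega
      have hz := h k (by omega)
      rw [List.getD_eq_getElem (es.toList.zip cs.toList) (' ', ' ') (by first | omega | (rw [List.length_zip]; omega)),
          List.getElem_zip] at hz
      unfold okPair at hz
      unfold okB
      rw [List.getD_eq_getElem _ _ (by omega), List.getD_eq_getElem _ _ hk']
      simpa using hz
    · intro h k hk
      have hk1 : k < es.toList.length := by omega
      have hk2 : k < cs.toList.length := by omega
      have hz := h k hk2
      rw [List.getD_eq_getElem (es.toList.zip cs.toList) (' ', ' ') (by first | omega | (rw [List.length_zip]; omega)),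
          List.getElem_zip]
      unfold okB at hz
      unfold okPair
      rw [List.getD_eq_getElem _ _ hk1, List.getD_eq_getElem _ _ hk2] at hz
      simpa using hz
  · rw [if_pos (by omega)]
    exact iff_of_false (by simp) (fun hcon => hlen hcon.1)

lemma containsA_iff (es : String) (mask : List Int) (hs : String)
    (hm : 0 < es.toList.length) :
    (flex_contains_upper_py es mask hs = true ↔
      ∃ i, i + es.toList.length ≤ hs.toList.length ∧
        ∀ k < es.toList.length, okB es.toList mask k (hs.toList.getD (i + k) ' ') = true) := by
  unfold flex_contains_upper_py
  rw [if_neg (by omega)]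
  rw [List.any_eq_true]
  constructor
  · rintro ⟨i, hi, hEq⟩
    rw [PySem.List.mem_pyRange_one] at hi
    obtain ⟨hi0, hilt⟩ := hi
    set iN := i.toNat with hiN
    have hic : i = (iN : Int) := (Int.toNat_of_nonneg hi0).symm
    rw [hic] at hEq
    have hslice : (PySem.Str.slice hs (some (iN : Int)) (some ((iN : Int) + (es.toList.length : Int)))).toList
        = (hs.toList.drop iN).take es.toList.length := by
      rw [PySem.Str.toList_slice, PySem.Chars.slice_eq_listSlice, PySem.List.slice_natCast_add]
    rw [equalA_iff] at hEq
    rw [hslice] at hEq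
    obtain ⟨hlen, hall⟩ := hEq
    have hbound : iN + es.toList.length ≤ hs.toList.length := by
      rw [List.length_take, List.length_drop] at hlen
      omega
    refine ⟨iN, hbound, fun k hk => ?_⟩
    have h1 := hall k hk
    have hik : iN + k < hs.toList.length := by omega
    rw [List.getD_eq_getElem _ _ (by rw [List.length_take, List.length_drop]; omega),
        List.getElem_take, List.getElem_drop] at h1
    rw [List.getD_eq_getElem _ _ hik]
    exact h1
  · rintro ⟨iN, hb, hall⟩
    refine ⟨(iN : Int), ?_, ?_⟩
    · rw [PySem.List.mem_pyRange_one]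
      constructor
      · positivity
      · omega
    · have hslice : (PySem.Str.slice hs (some (iN : Int)) (some ((iN : Int) + (es.toList.length : Int)))).toList
          = (hs.toList.drop iN).take es.toList.length := by
        rw [PySem.Str.toList_slice, PySem.Chars.slice_eq_listSlice, PySem.List.slice_natCast_add]
      rw [equalA_iff, hslice]
      constructor
      · rw [List.length_take, List.length_drop]; omega
      · intro k hk
        have hik : iN + k < hs.toList.length := by omega
        rw [List.getD_eq_getElem _ _ (by rw [List.length_take, List.length_drop]; omega),
            List.getElem_take, List.getElem_drop]
        have := hall k hk
        rwa [List.getD_eq_getElem _ _ hik] at this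

lemma comp_drop_iff (e : List Char) (mask : List Int) (h : List Char) (i : Nat) (hi : i ≤ h.length) :
    (Comp e mask 0 (h.drop i) ↔
      i + e.length ≤ h.length ∧ ∀ k < e.length, okB e mask k (h.getD (i + k) ' ') = true) := by
  unfold Comp
  rw [List.length_drop]
  constructor
  · rintro ⟨hlen, hall⟩
    refine ⟨by omega, fun k hk => ?_⟩
    have h1 := hall k (by omega)
    have hik : i + k < h.length := by omega
    rw [List.getD_eq_getElem _ _ (by rw [List.length_drop]; omega), List.getElem_drop] at h1
    rw [List.getD_eq_getElem _ _ hik]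
    simpa using h1
  · rintro ⟨hb, hall⟩
    refine ⟨by omega, fun k hk => ?_⟩
    have h1 := hall k (by omega)
    have hik : i + k < h.length := by omega
    rw [List.getD_eq_getElem _ _ (by rw [List.length_drop]; omega), List.getElem_drop]
    rw [List.getD_eq_getElem _ _ hik] at h1
    simpa using h1

-- ===== VERDICT (by name: the statement is the Claim_ definition above) =====
theorem flex_contains_upper_py_spec : Claim_equal_flex_contains_upper_py := by
  intro es mask hs _dom
  unfold Spec_flex_contains_upper_py
  by_cases h0 : es.toList.length = 0
  · unfold flex_contains_upper_py flex_contains_upper_py_alt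
    simp [h0]
  · have hm : 0 < es.toList.length := by omega
    rw [Bool.eq_iff_iff]
    rw [containsA_iff es mask hs hm]
    unfold flex_contains_upper_py_alt
    rw [if_neg h0]
    rw [scanB_iff es.toList mask hm hs.toList [] (by simp)]
    constructor
    · rintro ⟨i, hb, hall⟩
      exact Or.inr ⟨i, by omega, (comp_drop_iff _ _ _ _ (by omega)).2 ⟨hb, hall⟩⟩
    · rintro (⟨j, hj, _⟩ | ⟨i, hi, hc⟩)
      · simp at hj
      · obtain ⟨hb, hall⟩ := (comp_drop_iff _ _ _ _ (by omega)).1 hc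
        exact ⟨i, hb, hall⟩
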